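-- pv_equiv track=rewrite | github.com/Fabricio1210/AlexaSkill | Skill/lambda/services.py | buscar_prestamo_activo
-- ===== SOURCE A (Python) =====
-- def buscar_prestamo_activo(prestamos_dicts, titulo, id_prestamo):
--     if not prestamos_dicts:
--         return None, -1
--     prestamo_encontrado = None
--     indice = -1
--     if id_prestamo:
--         for i, p in enumerate(prestamos_dicts):
--             if p.get("id") == id_prestamo:
--                 return p, i
--     if titulo:
--         titulo_lower = titulo.lower()
--         for i, p in enumerate(prestamos_dicts):
--             if titulo_lower in p.get("titulo", "").lower():
--                 return p, i
--     return None, -1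
-- ===== SOURCE B (Python) =====
-- def buscar_prestamo_activo(prestamos_dicts, titulo, id_prestamo):
--     titulo_lower = titulo.lower() if titulo else None
--     title_hit = None
--     for i, p in enumerate(prestamos_dicts):
--         if id_prestamo and p.get("id") == id_prestamo:
--             return p, i
--         if titulo_lower is not None and title_hit is None \
--                 and titulo_lower in p.get("titulo", "").lower():
--             title_hit = (p, i)
--     return title_hit if title_hit is not None else (None, -1)
-- ===== Notes on version B (the rewrite author's own statement) =====
-- stated objective: alternative
-- what changed: Fuses A's two sequential scans (id scan, then title scan) into one pass over enumerate that returns immediately on an id match and remembers only the first title match.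
import Mathlib
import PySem

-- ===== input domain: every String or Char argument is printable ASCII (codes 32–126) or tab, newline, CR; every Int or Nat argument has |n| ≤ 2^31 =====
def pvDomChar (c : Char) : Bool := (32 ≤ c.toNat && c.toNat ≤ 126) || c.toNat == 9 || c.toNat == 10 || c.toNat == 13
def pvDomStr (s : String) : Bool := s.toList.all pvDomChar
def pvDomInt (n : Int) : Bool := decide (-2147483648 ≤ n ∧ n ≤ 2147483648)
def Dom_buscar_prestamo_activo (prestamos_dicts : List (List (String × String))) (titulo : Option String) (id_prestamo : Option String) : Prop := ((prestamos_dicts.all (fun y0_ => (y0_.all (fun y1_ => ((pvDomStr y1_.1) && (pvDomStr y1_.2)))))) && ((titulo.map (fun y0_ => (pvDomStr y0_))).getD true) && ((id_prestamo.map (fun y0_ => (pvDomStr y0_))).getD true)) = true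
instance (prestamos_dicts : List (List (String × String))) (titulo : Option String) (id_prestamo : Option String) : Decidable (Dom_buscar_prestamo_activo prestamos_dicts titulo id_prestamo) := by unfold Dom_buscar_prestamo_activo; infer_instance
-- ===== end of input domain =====

-- B fuses A's two sequential scans into a single pass that returns on the first id match and remembers the first title match; return values only (no mutation in either version).

-- truthiness of an optional string: non-None and non-empty
def pvTruthy (o : Option String) : Bool :=
  match o with
  | none => false
  | some s => !s.toList.isEmpty

-- ===== PORT A =====
-- A's first loop: 'for i, p in enumerate(...): if p.get("id") == id_prestamo: return p, i'
def pvAFindId (l : List (Int × List (String × String))) (id_prestamo : Option String) :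
    Option (List (String × String) × Int) :=
  match l with
  | [] => none
  | (i, p) :: rest =>
    if (PySem.Dict.mk p).get? "id" == id_prestamo then some (p, i) else pvAFindId rest id_prestamo

-- A's second loop: 'if titulo_lower in p.get("titulo", "").lower(): return p, i'
def pvAFindTitle (l : List (Int × List (String × String))) (tl : List Char) :
    Option (List (String × String) × Int) :=
  match l with
  | [] => none
  | (i, p) :: rest =>
    if PySem.Chars.isIn tl (PySem.Chars.lower ((PySem.Dict.mk p).getD "titulo" "").toList) then
      some (p, i)
    else pvAFindTitle rest tl

def buscar_prestamo_activo (prestamos_dicts : List (List (String × String))) (titulo : Option String) (id_prestamo : Option String) : (Option (List (String × String))) × Int :=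
  if prestamos_dicts.isEmpty then (none, -1)
  else
    match (if pvTruthy id_prestamo
           then pvAFindId (PySem.List.enumerate prestamos_dicts 0) id_prestamo
           else none) with
    | some (p, i) => (some p, i)
    | none =>
      if pvTruthy titulo then
        match pvAFindTitle (PySem.List.enumerate prestamos_dicts 0)
                (PySem.Chars.lower (titulo.getD "").toList) with
        | some (p, i) => (some p, i)
        | none => (none, -1)
      else (none, -1)

-- ===== PORT B =====
-- B's single loop; best = the remembered first title match
def pvBLoop (l : List (Int × List (String × String))) (tl : Option (List Char))
    (id_prestamo : Option String) (best : Option (List (String × String) × Int)) :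
    (Option (List (String × String))) × Int :=
  match l with
  | [] =>
    match best with
    | some (p, i) => (some p, i)
    | none => (none, -1)
  | (i, p) :: rest =>
    if pvTruthy id_prestamo && ((PySem.Dict.mk p).get? "id" == id_prestamo) then (some p, i)
    else
      let best' :=
        match best with
        | some r => some r
        | none =>
          match tl with
          | some t =>
            if PySem.Chars.isIn t (PySem.Chars.lower ((PySem.Dict.mk p).getD "titulo" "").toList)
            then some (p, i) else none
          | none => none
      pvBLoop rest tl id_prestamo best'

def buscar_prestamo_activo_alt (prestamos_dicts : List (List (String × String))) (titulo : Option String) (id_prestamo : Option String) : (Option (List (String × String))) × Int :=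
  let tl := if pvTruthy titulo then some (PySem.Chars.lower (titulo.getD "").toList) else none
  pvBLoop (PySem.List.enumerate prestamos_dicts 0) tl id_prestamo none

-- ===== PRECONDITION & SPEC =====
def Spec_buscar_prestamo_activo (prestamos_dicts : List (List (String × String))) (titulo : Option String) (id_prestamo : Option String) (out : (Option (List (String × String))) × Int) : Prop := out = buscar_prestamo_activo_alt prestamos_dicts titulo id_prestamo
instance (prestamos_dicts : List (List (String × String))) (titulo : Option String) (id_prestamo : Option String) (out : (Option (List (String × String))) × Int) : Decidable (Spec_buscar_prestamo_activo prestamos_dicts titulo id_prestamo out) := by unfold Spec_buscar_prestamo_activo; infer_instance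

-- ===== CLAIM (what is proved, stated in full; the proofs are below) =====
def Claim_equal_buscar_prestamo_activo : Prop := ∀ (prestamos_dicts : List (List (String × String))) (titulo : Option String) (id_prestamo : Option String), Dom_buscar_prestamo_activo prestamos_dicts titulo id_prestamo → Spec_buscar_prestamo_activo prestamos_dicts titulo id_prestamo (buscar_prestamo_activo prestamos_dicts titulo id_prestamo)

-- ===== LEMMAS AND PROOFS =====

-- B's one-pass loop equals A's staged scans applied to the same suffix
theorem pvBLoop_eq (l : List (Int × List (String × String))) (tl : Option (List Char))
    (idp : Option String) (best : Option (List (String × String) × Int)) :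
    pvBLoop l tl idp best =
      match (if pvTruthy idp then pvAFindId l idp else none) with
      | some (p, i) => (some p, i)
      | none =>
        match best with
        | some (p, i) => (some p, i)
        | none =>
          match tl with
          | some t =>
            (match pvAFindTitle l t with
             | some (p, i) => (some p, i)
             | none => (none, -1))
          | none => (none, -1) := by
  induction l generalizing best with
  | nil =>
    cases best <;> cases tl <;> simp [pvBLoop, pvAFindId, pvAFindTitle]
  | cons hd rest ih =>
    obtain ⟨i, p⟩ := hd
    by_cases hid : (pvTruthy idp && ((PySem.Dict.mk p).get? "id" == idp)) = true
    · have h1 : pvTruthy idp = true := by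
        revert hid; cases pvTruthy idp <;> simp
      have h2 : ((PySem.Dict.mk p).get? "id" == idp) = true := by
        revert hid; cases ((PySem.Dict.mk p).get? "id" == idp) <;> simp
      simp only [pvBLoop]
      rw [if_pos hid]
      simp [pvAFindId, h1, h2]
    · have hskip : (if pvTruthy idp then pvAFindId ((i, p) :: rest) idp else none)
          = (if pvTruthy idp then pvAFindId rest idp else none) := by
        cases h1 : pvTruthy idp with
        | false => simp
        | true =>
          have h2 : ((PySem.Dict.mk p).get? "id" == idp) = false := by
            cases hg : ((PySem.Dict.mk p).get? "id" == idp) with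
            | true => exact absurd (by simp [h1, hg]) hid
            | false => rfl
          simp [pvAFindId, h2]
      simp only [pvBLoop]
      rw [if_neg hid, ih, hskip]
      cases hf : (if pvTruthy idp then pvAFindId rest idp else none) with
      | some r => rfl
      | none =>
        cases best with
        | some r => rfl
        | none =>
          cases tl with
          | none => rfl
          | some t =>
            by_cases htm : PySem.Chars.isIn t
                (PySem.Chars.lower ((PySem.Dict.mk p).getD "titulo" "").toList) = true
            · simp [pvAFindTitle, htm]
            · simp [pvAFindTitle, htm]

-- ===== VERDICT (by name: the statement is the Claim_ definition above) =====
theorem buscar_prestamo_activo_spec : Claim_equal_buscar_prestamo_activo := by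
  intro pd titulo idp _
  unfold Spec_buscar_prestamo_activo buscar_prestamo_activo buscar_prestamo_activo_alt
  rw [pvBLoop_eq]
  cases pd with
  | nil =>
    cases h : pvTruthy idp <;> cases ht : pvTruthy titulo <;>
      simp [PySem.List.enumerate, pvAFindId, pvAFindTitle, h, ht]
  | cons hd tl' =>
    cases hf : (if pvTruthy idp then pvAFindId (PySem.List.enumerate (hd :: tl') 0) idp
                else none) with
    | some r => obtain ⟨p, i⟩ := r; rfl
    | none => cases pvTruthy titulo <;> rfl
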